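-- pv_equiv track=rewrite | github.com/hisyatokaku/Competition | ABC/032/D.py | all_comb
-- ===== SOURCE A (Python) =====
-- def all_comb(a):
--     cands_a = []
--     for i in range(1 << len(a)):
--         cand = [0, 0]
--         for j in range(len(a)):
--             use_j = (i >> j) & 1
--             if use_j:
--                 cand[0] += a[j][0]
--                 cand[1] += a[j][1]
--         cands_a.append(cand)
--     return cands_a
-- ===== SOURCE B (Python) =====
-- def all_comb(a):
--     # Subset-sum DP: each element doubles the list of partial sums; the
--     # doubling order (new element = next-higher bit) reproduces A's
--     # bitmask enumeration order exactly.
--     cands = [[0, 0]]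
--     for row in a:
--         x, y = row[0], row[1]
--         cands = cands + [[c[0] + x, c[1] + y] for c in cands]
--     return cands
-- ===== Notes on version B (the rewrite author's own statement) =====
-- stated objective: faster
-- what changed: Replaces the per-bitmask inner scan over all n elements with a doubling DP that extends the list of partial sums once per element, so each of the 2^n subset sums is produced in O(1) from an earlier one.
import Mathlib
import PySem

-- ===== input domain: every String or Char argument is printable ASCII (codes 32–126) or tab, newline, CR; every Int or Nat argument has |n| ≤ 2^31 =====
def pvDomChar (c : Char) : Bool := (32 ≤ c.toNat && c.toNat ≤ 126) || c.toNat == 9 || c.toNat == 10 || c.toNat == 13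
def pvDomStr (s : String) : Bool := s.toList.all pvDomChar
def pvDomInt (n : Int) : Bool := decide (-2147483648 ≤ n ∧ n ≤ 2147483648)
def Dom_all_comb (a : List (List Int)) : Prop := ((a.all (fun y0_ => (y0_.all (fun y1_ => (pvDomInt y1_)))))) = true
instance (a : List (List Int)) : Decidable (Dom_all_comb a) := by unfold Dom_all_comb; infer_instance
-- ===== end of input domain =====

-- B replaces A's O(n·2^n) per-bitmask inner scan by an O(2^n) doubling DP in the same output order.

-- ===== PORT A =====
-- pyGetD with default is used where Python indexing would raise IndexError; those inputs are excluded by Pre_all_comb.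
def all_comb (a : List (List Int)) : List (List Int) :=
  (PySem.List.pyRange 0 ((1 : Int) <<< a.length) 1).foldl
    (fun cands_a i =>
      cands_a ++
        [(PySem.List.pyRange 0 (a.length : Int) 1).foldl
          (fun cand j =>
            let use_j := PySem.Int.band (i >>> (j.toNat : Int)) 1
            if use_j ≠ 0 then
              [PySem.List.pyGetD cand 0 0 + PySem.List.pyGetD (PySem.List.pyGetD a j []) 0 0,
               PySem.List.pyGetD cand 1 0 + PySem.List.pyGetD (PySem.List.pyGetD a j []) 1 0]
            else cand)
          [0, 0]])
    []

-- ===== PORT B =====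
def all_comb_alt (a : List (List Int)) : List (List Int) :=
  a.foldl
    (fun cands row =>
      let x := PySem.List.pyGetD row 0 0
      let y := PySem.List.pyGetD row 1 0
      cands ++ cands.map (fun c => [PySem.List.pyGetD c 0 0 + x, PySem.List.pyGetD c 1 0 + y]))
    [[0, 0]]

-- ===== PRECONDITION & SPEC =====
-- Pre_ excludes exactly the inputs on which Python A raises IndexError: a row with fewer than 2 entries.
def Pre_all_comb (a : List (List Int)) : Prop := ∀ r ∈ a, 2 ≤ r.length
instance (a : List (List Int)) : Decidable (Pre_all_comb a) := by unfold Pre_all_comb; infer_instance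
def pvWitness_all_comb : List (List Int) := [[1, 2], [3, 4]]
def Spec_all_comb (a : List (List Int)) (out : List (List Int)) : Prop := out = all_comb_alt a
instance (a : List (List Int)) (out : List (List Int)) : Decidable (Spec_all_comb a out) := by unfold Spec_all_comb; infer_instance

-- ===== CLAIM (what is proved, stated in full; the proofs are below) =====
def Claim_equal_all_comb : Prop := ∀ (a : List (List Int)), Dom_all_comb a → Pre_all_comb a → Spec_all_comb a (all_comb a)

-- ===== LEMMAS AND PROOFS =====

-- A's inner loop for one bitmask i.
def innerA (a : List (List Int)) (i : Int) : List Int :=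
  (PySem.List.pyRange 0 (a.length : Int) 1).foldl
    (fun cand j =>
      let use_j := PySem.Int.band (i >>> (j.toNat : Int)) 1
      if use_j ≠ 0 then
        [PySem.List.pyGetD cand 0 0 + PySem.List.pyGetD (PySem.List.pyGetD a j []) 0 0,
         PySem.List.pyGetD cand 1 0 + PySem.List.pyGetD (PySem.List.pyGetD a j []) 1 0]
      else cand)
    [0, 0]

-- B's per-element extension map.
def gB (r : List Int) (c : List Int) : List Int :=
  [PySem.List.pyGetD c 0 0 + PySem.List.pyGetD r 0 0,
   PySem.List.pyGetD c 1 0 + PySem.List.pyGetD r 1 0]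

lemma all_comb_eq_map (a : List (List Int)) :
    all_comb a = (PySem.List.pyRange 0 ((1 : Int) <<< a.length) 1).map (innerA a) := by
  unfold all_comb innerA
  exact (PySem.List.foldl_append_singleton_eq_map _ _ _).trans (List.nil_append _)

-- bit test as arithmetic
lemma band_shift_nat (k j : Nat) :
    PySem.Int.band ((k : Int) >>> ((j : Nat) : Int)) 1 = ((k / 2 ^ j % 2 : Nat) : Int) := by
  have h1 : ((k : Int) >>> ((j : Nat) : Int)) = ((k >>> j : Nat) : Int) := by simp
  rw [h1]
  have h2 : (1 : Int) = ((1 : Nat) : Int) := rfl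
  rw [h2, PySem.Int.band_natCast]
  simp [Nat.and_one_is_mod, Nat.shiftRight_eq_div_pow]

lemma div_pow_add (n k j : Nat) (hj : j < n) (_hk : k < 2 ^ n) :
    (2 ^ n + k) / 2 ^ j % 2 = k / 2 ^ j % 2 := by
  have hpos : 0 < 2 ^ j := Nat.two_pow_pos j
  have hdecomp : 2 ^ n = 2 ^ j * (2 * 2 ^ (n - j - 1)) := by
    rw [← pow_succ', ← pow_add]
    congr 1
    omega
  rw [hdecomp, Nat.mul_add_div hpos]
  omega

lemma div_pow_top (n k : Nat) (hk : k < 2 ^ n) :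
    (2 ^ n + k) / 2 ^ n % 2 = 1 := by
  have hpos : 0 < 2 ^ n := Nat.two_pow_pos n
  have h1 : 2 ^ n + k = 2 ^ n * 1 + k := by ring
  rw [h1, Nat.mul_add_div hpos, Nat.div_eq_of_lt hk]

lemma div_pow_self_lt (n k : Nat) (hk : k < 2 ^ n) :
    k / 2 ^ n % 2 = 0 := by
  rw [Nat.div_eq_of_lt hk]

lemma getD_append_left (a : List (List Int)) (r : List Int) (j : Int)
    (h0 : 0 ≤ j) (hj : j < (a.length : Int)) :
    PySem.List.pyGetD (a ++ [r]) j [] = PySem.List.pyGetD a j [] := by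
  obtain ⟨m, rfl⟩ := Int.eq_ofNat_of_zero_le h0
  have hm : m < a.length := by exact_mod_cast hj
  simp [PySem.List.pyGetD_natCast, List.getD_eq_getElem?_getD, List.getElem?_append_left hm]

lemma getD_append_self (a : List (List Int)) (r : List Int) :
    PySem.List.pyGetD (a ++ [r]) (a.length : Int) [] = r := by
  simp [PySem.List.pyGetD_natCast, List.getD_eq_getElem?_getD]

lemma range_snoc (a : List (List Int)) (r : List Int) :
    PySem.List.pyRange 0 (((a ++ [r]).length : Int)) 1 =
      PySem.List.pyRange 0 (a.length : Int) 1 ++ [(a.length : Int)] := by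
  have h : (((a ++ [r]).length : Int)) = (a.length : Int) + 1 := by simp
  rw [h, PySem.List.pyRange_one_succ_right (by positivity)]

-- low masks: appending a row does not change innerA
lemma innerA_snoc_low (a : List (List Int)) (r : List Int) (k : Nat) (hk : k < 2 ^ a.length) :
    innerA (a ++ [r]) (k : Int) = innerA a (k : Int) := by
  unfold innerA
  rw [range_snoc, List.foldl_append]
  have hcongr :
      (PySem.List.pyRange 0 (a.length : Int) 1).foldl
        (fun cand j =>
          let use_j := PySem.Int.band ((k : Int) >>> j.toNat) 1
          if use_j ≠ 0 then
            [PySem.List.pyGetD cand 0 0 + PySem.List.pyGetD (PySem.List.pyGetD (a ++ [r]) j []) 0 0,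
             PySem.List.pyGetD cand 1 0 + PySem.List.pyGetD (PySem.List.pyGetD (a ++ [r]) j []) 1 0]
          else cand) [0, 0] =
      (PySem.List.pyRange 0 (a.length : Int) 1).foldl
        (fun cand j =>
          let use_j := PySem.Int.band ((k : Int) >>> j.toNat) 1
          if use_j ≠ 0 then
            [PySem.List.pyGetD cand 0 0 + PySem.List.pyGetD (PySem.List.pyGetD a j []) 0 0,
             PySem.List.pyGetD cand 1 0 + PySem.List.pyGetD (PySem.List.pyGetD a j []) 1 0]
          else cand) [0, 0] := by
    apply PySem.List.foldl_congr_mem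
    intro acc x hx
    rcases (PySem.List.mem_pyRange_one).1 hx with ⟨h0, h1⟩
    rw [getD_append_left a r x h0 h1]
  rw [hcongr]
  simp only [List.foldl_cons, List.foldl_nil, Int.toNat_natCast,
    band_shift_nat k a.length, div_pow_self_lt _ _ hk]
  simp

-- high masks: bit a.length is set, the appended row is added last
lemma innerA_snoc_high (a : List (List Int)) (r : List Int) (k : Nat) (hk : k < 2 ^ a.length) :
    innerA (a ++ [r]) ((2 ^ a.length + k : Nat) : Int) = gB r (innerA a (k : Int)) := by
  unfold innerA
  rw [range_snoc, List.foldl_append]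
  have hcongr :
      (PySem.List.pyRange 0 (a.length : Int) 1).foldl
        (fun cand j =>
          let use_j := PySem.Int.band (((2 ^ a.length + k : Nat) : Int) >>> j.toNat) 1
          if use_j ≠ 0 then
            [PySem.List.pyGetD cand 0 0 + PySem.List.pyGetD (PySem.List.pyGetD (a ++ [r]) j []) 0 0,
             PySem.List.pyGetD cand 1 0 + PySem.List.pyGetD (PySem.List.pyGetD (a ++ [r]) j []) 1 0]
          else cand) [0, 0] =
      (PySem.List.pyRange 0 (a.length : Int) 1).foldl
        (fun cand j =>
          let use_j := PySem.Int.band ((k : Int) >>> j.toNat) 1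
          if use_j ≠ 0 then
            [PySem.List.pyGetD cand 0 0 + PySem.List.pyGetD (PySem.List.pyGetD a j []) 0 0,
             PySem.List.pyGetD cand 1 0 + PySem.List.pyGetD (PySem.List.pyGetD a j []) 1 0]
          else cand) [0, 0] := by
    apply PySem.List.foldl_congr_mem
    intro acc x hx
    rcases (PySem.List.mem_pyRange_one).1 hx with ⟨h0, h1⟩
    rw [getD_append_left a r x h0 h1]
    obtain ⟨m, rfl⟩ := Int.eq_ofNat_of_zero_le h0
    have hm : m < a.length := by exact_mod_cast h1
    simp only [Int.toNat_natCast, band_shift_nat (2 ^ a.length + k) m, band_shift_nat k m,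
        div_pow_add a.length k m hm hk]
  rw [hcongr]
  simp only [List.foldl_cons, List.foldl_nil, Int.toNat_natCast,
    band_shift_nat (2 ^ a.length + k) a.length, div_pow_top _ _ hk, getD_append_self]
  simp [gB]

lemma shift_pow (n : Nat) : ((1 : Int) <<< n) = ((2 ^ n : Nat) : Int) := by
  simp [Int.shiftLeft_eq]

lemma map_range_innerA (a : List (List Int)) :
    all_comb a = (List.range (2 ^ a.length)).map (fun (k : Nat) => innerA a ((k : Nat) : Int)) := by
  rw [all_comb_eq_map, shift_pow, PySem.List.pyRange_one]
  have h0 : (((2 ^ a.length : Nat) : Int) - 0).toNat = 2 ^ a.length := by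
    rw [Int.sub_zero]; exact Int.toNat_natCast _
  rw [h0, List.map_map]
  apply List.map_congr_left
  intro k _
  simp

lemma alt_snoc (a : List (List Int)) (r : List Int) :
    all_comb_alt (a ++ [r]) = all_comb_alt a ++ (all_comb_alt a).map (gB r) := by
  simp [all_comb_alt, List.foldl_append, gB]

lemma main_eq (a : List (List Int)) : all_comb a = all_comb_alt a := by
  induction a using List.reverseRecOn with
  | nil => decide
  | append_singleton a r ih =>
    rw [alt_snoc, ← ih, map_range_innerA (a ++ [r])]
    have hlen : (a ++ [r]).length = a.length + 1 := by simp
    rw [hlen]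
    have hsplit : List.range (2 ^ (a.length + 1)) =
        List.range (2 ^ a.length) ++ (List.range (2 ^ a.length)).map (fun k => 2 ^ a.length + k) := by
      have h2 : 2 ^ (a.length + 1) = 2 ^ a.length + 2 ^ a.length := by ring
      rw [h2, List.range_add]
    rw [hsplit, List.map_append, List.map_map]
    congr 1
    · rw [map_range_innerA a]
      apply List.map_congr_left
      intro k hk
      exact innerA_snoc_low a r k (List.mem_range.1 hk)
    · rw [map_range_innerA a, List.map_map]
      apply List.map_congr_left
      intro k hk
      have hk' := List.mem_range.1 hk
      simp only [Function.comp_def]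
      exact innerA_snoc_high a r k hk'

-- ===== VERDICT (by name: the statement is the Claim_ definition above) =====
theorem all_comb_spec : Claim_equal_all_comb := by
  intro a _ _
  unfold Spec_all_comb
  exact main_eq a
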